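-- pv_equiv track=rewrite | github.com/Mustafa-Almohsen/Ghostchars- | zwbypass.py | insert_into_keywords
-- ===== SOURCE A (Python) =====
-- def insert_between_every(s, zwchar, between_alnum_only=True, every_n=1):
--     out = []
--     for i, ch in enumerate(s):
--         out.append(ch)
--         if i < len(s)-1:
--             if (not between_alnum_only) or (ch.isalnum() and s[i+1].isalnum()):
--                 if every_n <= 1 or ((i+1) % every_n == 0):
--                     out.append(zwchar)
--     return "".join(out)
--
-- def insert_into_keywords(s, keywords, zwchar, case_sensitive=False):
--     """
--     For each keyword, replace it with a zero-width-split version (e.g., a\u200Bd\u200Bm\u200Bi\u200Bn)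
--     but leave the rest of the string unchanged.
--     """
--     flags = 0
--     replaced = s
--     for kw in keywords:
--         if not kw:
--             continue
--         target = kw if case_sensitive else kw.lower()
--         hay = replaced if case_sensitive else replaced.lower()
--         # Build split version of kw:
--         split_kw = insert_between_every(kw, zwchar, between_alnum_only=False)
--         # Manual scan to preserve original casing/segments exactly:
--         i = 0
--         buf = []
--         while i < len(replaced):
--             segment = replaced[i:i+len(kw)]
--             hay_segment = hay[i:i+len(kw)]
--             if hay_segment == target:
--                 buf.append(split_kw)
--                 i += len(kw)
--             else:
--                 buf.append(replaced[i])
--                 i += 1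
--         replaced = "".join(buf)
--     return replaced
-- ===== SOURCE B (Python) =====
-- def insert_into_keywords(s, keywords, zwchar, case_sensitive=False):
--     replaced = s
--     for kw in keywords:
--         if not kw:
--             continue
--         target = kw if case_sensitive else kw.lower()
--         hay = replaced if case_sensitive else replaced.lower()
--         split_kw = zwchar.join(kw)
--         parts = []
--         i = 0
--         while True:
--             j = hay.find(target, i)
--             if j == -1:
--                 parts.append(replaced[i:])
--                 break
--             parts.append(replaced[i:j])
--             parts.append(split_kw)
--             i = j + len(kw)
--         replaced = "".join(parts)
--     return replaced
-- ===== Notes on version B (the rewrite author's own statement) =====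
-- stated objective: alternative
-- what changed: B replaces A's per-keyword character-by-character scan that slices and compares a len(kw) window at every position with find-and-jump: hay.find(target, i) locates the next match and the untouched chunk replaced[i:j] is copied in one slice; the split keyword is built with zwchar.join(kw) instead of the enumerate loop.
import Mathlib
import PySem

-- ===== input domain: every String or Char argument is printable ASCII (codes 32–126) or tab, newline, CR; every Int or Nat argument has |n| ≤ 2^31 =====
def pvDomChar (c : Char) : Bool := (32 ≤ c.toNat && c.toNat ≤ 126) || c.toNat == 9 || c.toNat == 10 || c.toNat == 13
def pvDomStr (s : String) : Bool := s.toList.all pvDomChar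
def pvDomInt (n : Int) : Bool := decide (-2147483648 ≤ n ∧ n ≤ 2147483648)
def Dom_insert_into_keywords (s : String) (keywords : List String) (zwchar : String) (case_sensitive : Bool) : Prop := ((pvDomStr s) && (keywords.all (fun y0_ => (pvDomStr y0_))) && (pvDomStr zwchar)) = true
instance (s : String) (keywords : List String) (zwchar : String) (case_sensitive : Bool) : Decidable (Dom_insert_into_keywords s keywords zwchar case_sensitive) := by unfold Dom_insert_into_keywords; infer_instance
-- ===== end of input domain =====

-- B replaces A's per-position slice-and-compare scan by find-and-jump substring search
-- (copy the chunk up to the next match in one slice); same return value on every input;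
-- proved equal everywhere (no precondition needed).


-- ===== PORT A =====

-- helper insert_between_every, transliterated (out accumulates code points; "".join(out) is the list itself).
-- s[i+1] is ported with pyGetD; its default is never used: the access is guarded by i < len(s)-1.
def insert_between_every (s : String) (zwchar : String) (between_alnum_only : Bool) (every_n : Int) : String :=
  String.ofList ((PySem.List.enumerate s.toList).foldl (fun out p =>
    let out := out ++ [p.2]
    if p.1 < (s.toList.length : Int) - 1 then
      if (!between_alnum_only || (PySem.Chars.isalnum p.2 && PySem.Chars.isalnum (PySem.List.pyGetD s.toList (p.1 + 1) ' '))) = true then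
        if every_n ≤ 1 ∨ PySem.Int.mod (p.1 + 1) every_n = 0 then out ++ zwchar.toList
        else out
      else out
    else out) [])

-- A's inner while-loop (manual scan, one position at a time; buf accumulates code points).
-- The fuel argument only makes the recursion structural; at the supplied value replaced.length + 1
-- it never runs out.  (A also computes an unused slice 'segment' of replaced; not materialised.)
def kwScanA (replaced hay target splitKw : List Char) (kwlen : Nat) : Nat → Nat → List Char
  | _, 0 => []
  | i, fuel+1 =>
    if _h : i < replaced.length then
      let hseg := PySem.List.slice hay (some (i : Int)) (some ((i : Int) + (kwlen : Int)))
      if hseg = target then splitKw ++ kwScanA replaced hay target splitKw kwlen (i + kwlen) fuel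
      else replaced[i] :: kwScanA replaced hay target splitKw kwlen (i + 1) fuel
    else []

def insert_into_keywords (s : String) (keywords : List String) (zwchar : String) (case_sensitive : Bool) : String :=
  String.ofList (keywords.foldl (fun replaced kw =>
    if kw.toList = [] then replaced
    else
      let target := if case_sensitive then kw.toList else PySem.Chars.lower kw.toList
      let hay := if case_sensitive then replaced else PySem.Chars.lower replaced
      let split_kw := (insert_between_every kw zwchar false 1).toList
      kwScanA replaced hay target split_kw kw.toList.length 0 (replaced.length + 1)) s.toList)

-- ===== PORT B =====

-- B's inner loop: jump from match to match with hay.find(target, i) and copy replaced[i:j] in one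
-- slice.  The fuel argument only makes the recursion structural; at the supplied value
-- replaced.length + 1 it never runs out.
def kwScanB (replaced hay target splitKw : List Char) (kwlen : Nat) : Nat → Nat → List Char
  | _, 0 => []
  | i, fuel+1 =>
    let j := PySem.Chars.findFrom hay target (i : Int) none
    if j = -1 then PySem.List.slice replaced (some (i : Int)) none
    else PySem.List.slice replaced (some (i : Int)) (some j) ++ splitKw ++
         kwScanB replaced hay target splitKw kwlen (j.toNat + kwlen) fuel

def insert_into_keywords_alt (s : String) (keywords : List String) (zwchar : String) (case_sensitive : Bool) : String :=
  String.ofList (keywords.foldl (fun replaced kw =>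
    if kw.toList = [] then replaced
    else
      let target := if case_sensitive then kw.toList else PySem.Chars.lower kw.toList
      let hay := if case_sensitive then replaced else PySem.Chars.lower replaced
      let split_kw := PySem.Chars.join zwchar.toList (kw.toList.map (fun c => [c]))
      kwScanB replaced hay target split_kw kw.toList.length 0 (replaced.length + 1)) s.toList)

-- ===== PRECONDITION & SPEC =====
def Spec_insert_into_keywords (s : String) (keywords : List String) (zwchar : String) (case_sensitive : Bool) (out : String) : Prop := out = insert_into_keywords_alt s keywords zwchar case_sensitive
instance (s : String) (keywords : List String) (zwchar : String) (case_sensitive : Bool) (out : String) : Decidable (Spec_insert_into_keywords s keywords zwchar case_sensitive out) := by unfold Spec_insert_into_keywords; infer_instance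

-- ===== CLAIM (what is proved, stated in full; the proofs are below) =====
def Claim_equal_insert_into_keywords : Prop := ∀ (s : String) (keywords : List String) (zwchar : String) (case_sensitive : Bool), Dom_insert_into_keywords s keywords zwchar case_sensitive → Spec_insert_into_keywords s keywords zwchar case_sensitive (insert_into_keywords s keywords zwchar case_sensitive)

-- ===== LEMMAS AND PROOFS =====

-- a prefix of s is found at index 0
theorem pv_find_of_prefix (s sub : List Char) (hp : sub <+: s) : PySem.Chars.find s sub = 0 := by
  have h0 : 0 ≤ PySem.Chars.find s sub := (PySem.Chars.find_nonneg_iff s sub).mpr hp.isInfix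
  obtain ⟨_, hmin⟩ := PySem.Chars.find_spec h0
  by_contra hne
  have hpos : 0 < (PySem.Chars.find s sub).toNat := by omega
  exact hmin 0 hpos (by simpa using hp)

-- find on a cons with no match at the head steps to the tail
theorem pv_find_cons_not_prefix (c : Char) (t sub : List Char) (hnp : ¬ sub <+: c :: t) :
    PySem.Chars.find (c :: t) sub =
      if PySem.Chars.find t sub = -1 then -1 else 1 + PySem.Chars.find t sub := by
  by_cases h2 : PySem.Chars.find t sub = -1
  · rw [if_pos h2]
    rw [PySem.Chars.find_eq_neg_one_iff] at h2 ⊢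
    rw [List.infix_cons_iff]
    tauto
  · rw [if_neg h2]
    have hinft : sub <:+: t := by
      by_contra hc
      exact h2 ((PySem.Chars.find_eq_neg_one_iff t sub).mpr hc)
    have h0t : 0 ≤ PySem.Chars.find t sub := (PySem.Chars.find_nonneg_iff t sub).mpr hinft
    have h0 : 0 ≤ PySem.Chars.find (c :: t) sub :=
      (PySem.Chars.find_nonneg_iff (c :: t) sub).mpr (List.infix_cons_iff.mpr (Or.inr hinft))
    obtain ⟨pa, mina⟩ := PySem.Chars.find_spec h0
    obtain ⟨pb, minb⟩ := PySem.Chars.find_spec h0t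
    set a := (PySem.Chars.find (c :: t) sub).toNat with ha
    set b := (PySem.Chars.find t sub).toNat with hb
    have hane : a ≠ 0 := by
      intro h; rw [h] at pa; simp at pa; exact hnp pa
    have hdrop : List.drop a (c :: t) = List.drop (a - 1) t := by
      obtain ⟨a', ha'⟩ : ∃ a', a = a' + 1 := ⟨a - 1, by omega⟩
      rw [ha']; simp
    have hba : b ≤ a - 1 := by
      by_contra hc
      exact minb (a - 1) (by omega) (hdrop ▸ pa)
    have hab : a ≤ b + 1 := by
      by_contra hc
      exact mina (b + 1) (by omega) (by simpa using pb)
    have : a = b + 1 := by omega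
    omega

-- a match right at the start index is what find returns
theorem pv_findFrom_self (hay target : List Char) (i : Nat) (hi : i ≤ hay.length)
    (hp : target <+: hay.drop i) :
    PySem.Chars.findFrom hay target (i : Int) none = (i : Int) := by
  rw [PySem.Chars.findFrom_natCast hay target i hi, pv_find_of_prefix _ _ hp]
  simp

-- a nonempty pattern is never found from the end of the haystack
theorem pv_findFrom_end (hay target : List Char) (hne : target ≠ []) :
    PySem.Chars.findFrom hay target (hay.length : Int) none = -1 := by
  rw [PySem.Chars.findFrom_natCast hay target hay.length le_rfl]
  have : PySem.Chars.find (List.drop hay.length hay) target = -1 := by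
    rw [PySem.Chars.find_eq_neg_one_iff]
    simp [hne]
  rw [if_pos this]

-- no match at i: findFrom from i equals findFrom from i+1
theorem pv_findFrom_step (hay target : List Char) (i : Nat) (hi : i < hay.length)
    (hnp : ¬ target <+: hay.drop i) :
    PySem.Chars.findFrom hay target (i : Int) none =
      PySem.Chars.findFrom hay target ((i + 1 : Nat) : Int) none := by
  rw [PySem.Chars.findFrom_natCast hay target i (by omega),
      PySem.Chars.findFrom_natCast hay target (i+1) (by omega)]
  have hdrop : List.drop i hay = hay[i] :: List.drop (i + 1) hay := List.drop_eq_getElem_cons hi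
  rw [hdrop, pv_find_cons_not_prefix _ _ _ (hdrop ▸ hnp)]
  by_cases h2 : PySem.Chars.find (List.drop (i+1) hay) target = -1
  · simp [h2]
  · have hge : 0 ≤ PySem.Chars.find (List.drop (i+1) hay) target :=
      (PySem.Chars.find_nonneg_iff _ _).mpr ((PySem.Chars.find_ne_neg_one_iff _ _).mp h2)
    rw [if_neg (by omega), if_neg h2]
    omega

-- no match at i: one character moves out of kwScanB's pending slice
theorem pv_scanB_step (replaced hay target splitKw : List Char) (kwlen : Nat) (i fb : Nat)
    (hlen : hay.length = replaced.length) (hi : i < replaced.length) (hnp : ¬ target <+: hay.drop i) :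
    kwScanB replaced hay target splitKw kwlen i (fb + 1) =
      replaced[i] :: kwScanB replaced hay target splitKw kwlen (i + 1) (fb + 1) := by
  have hstep := pv_findFrom_step hay target i (by omega) hnp
  simp only [kwScanB, hstep]
  by_cases hj : PySem.Chars.findFrom hay target ((i + 1 : Nat) : Int) none = -1
  · rw [if_pos hj, if_pos hj]
    rw [PySem.List.slice_from _ (by positivity), PySem.List.slice_from _ (by positivity)]
    simp only [Int.toNat_natCast]
    exact List.drop_eq_getElem_cons hi
  · rw [if_neg hj, if_neg hj]
    obtain ⟨hge, hpre, hmin⟩ := PySem.Chars.findFrom_natCast_spec hay target (i+1) (by omega) hj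
    set j := PySem.Chars.findFrom hay target ((i+1 : Nat) : Int) none with hjdef
    have hj0 : 0 ≤ j := by omega
    have hjl : (i:Int) + 1 ≤ j := by push_cast at hge; omega
    rw [PySem.List.slice_toNat _ (by positivity) hj0,
        PySem.List.slice_toNat _ (by positivity) hj0]
    simp only [Int.toNat_natCast]
    rw [List.drop_eq_getElem_cons hi]
    have : j.toNat - i = (j.toNat - (i+1)) + 1 := by omega
    rw [this, List.take_succ_cons]
    simp

-- the two inner loops agree (fuel large enough on both sides)
theorem pv_scan_eq (replaced hay target splitKw : List Char) (kwlen : Nat)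
    (hlen : hay.length = replaced.length) (ht : target.length = kwlen) (hk : 0 < kwlen) :
    ∀ fa i fb, i ≤ replaced.length → replaced.length + 1 ≤ fa + i → replaced.length + 1 ≤ fb + i →
      kwScanA replaced hay target splitKw kwlen i fa = kwScanB replaced hay target splitKw kwlen i fb := by
  have hne : target ≠ [] := by intro h; rw [h] at ht; simp at ht; omega
  intro fa
  induction fa with
  | zero => intro i fb h1 h2 h3; omega
  | succ fa ih =>
    intro i fb h1 h2 h3
    obtain ⟨fb', rfl⟩ : ∃ fb', fb = fb' + 1 := ⟨fb - 1, by omega⟩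
    by_cases hi : i < replaced.length
    · have hseg : PySem.List.slice hay (some (i : Int)) (some ((i : Int) + (kwlen : Int)))
          = (hay.drop i).take kwlen := by
        rw [PySem.List.slice_toNat _ (by positivity) (by positivity)]
        have h4 : ((i : Int) + (kwlen : Int)).toNat = i + kwlen := by omega
        rw [h4]
        simp
      by_cases hm : target <+: hay.drop i
      · -- match at i
        have htake : (hay.drop i).take kwlen = target := by
          rw [List.prefix_iff_eq_take.mp hm, ht]
        have hlenle : i + kwlen ≤ replaced.length := by
          have := hm.length_le
          rw [List.length_drop] at this
          omega
        have hfind := pv_findFrom_self hay target i (by omega) hm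
        have hA : kwScanA replaced hay target splitKw kwlen i (fa + 1)
            = splitKw ++ kwScanA replaced hay target splitKw kwlen (i + kwlen) fa := by
          rw [kwScanA, dif_pos hi]
          simp only [hseg, htake, if_true, eq_self_iff_true]
        have hB : kwScanB replaced hay target splitKw kwlen i (fb' + 1)
            = splitKw ++ kwScanB replaced hay target splitKw kwlen (i + kwlen) fb' := by
          rw [kwScanB]
          simp only [hfind]
          rw [if_neg (show ¬((i : Int) = -1) by omega)]
          rw [PySem.List.slice_toNat _ (by positivity) (by positivity)]
          simp
        rw [hA, hB, ih (i + kwlen) fb' (by omega) (by omega) (by omega)]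
      · -- no match at i
        have htake : (hay.drop i).take kwlen ≠ target := by
          intro h; exact hm (List.prefix_iff_eq_take.mpr (by rw [ht]; exact h.symm))
        have hA : kwScanA replaced hay target splitKw kwlen i (fa + 1)
            = replaced[i] :: kwScanA replaced hay target splitKw kwlen (i + 1) fa := by
          rw [kwScanA, dif_pos hi]
          simp only [hseg]
          rw [if_neg htake]
        rw [hA, pv_scanB_step replaced hay target splitKw kwlen i fb' hlen hi hm]
        rw [ih (i + 1) (fb' + 1) (by omega) (by omega) (by omega)]
    · -- i = replaced.length: both loops stop and return nothing
      have hie : i = replaced.length := by omega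
      have hfind : PySem.Chars.findFrom hay target (i : Int) none = -1 := by
        rw [hie, ← hlen]; exact pv_findFrom_end hay target hne
      rw [kwScanA, dif_neg hi, kwScanB]
      simp only [hfind, if_true, eq_self_iff_true]
      rw [PySem.List.slice_from _ (by positivity)]
      simp [hie]

-- reference shape of the zero-width-joined keyword
def pvGJoin (zw : List Char) : List Char → List Char
  | [] => []
  | [c] => [c]
  | c :: c2 :: rest => c :: (zw ++ pvGJoin zw (c2 :: rest))

theorem pv_join_eq_gJoin (zw : List Char) (cs : List Char) :
    PySem.Chars.join zw (cs.map (fun c => [c])) = pvGJoin zw cs := by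
  induction cs with
  | nil => simp [pvGJoin, PySem.Chars.join, List.intercalate]
  | cons c rest ih =>
    cases rest with
    | nil => simp [pvGJoin, PySem.Chars.join_singleton]
    | cons c2 rest' =>
      simp only [List.map_cons] at ih ⊢
      rw [PySem.Chars.join_cons_cons, ih, pvGJoin]
      simp

theorem pv_ibe_fold (zw : List Char) (N : Nat) (cs : List Char) :
    ∀ (k : Nat) (out : List Char), k + cs.length = N →
      (PySem.List.enumerate cs (k : Int)).foldl
        (fun out p => if p.1 < (N : Int) - 1 then (out ++ [p.2]) ++ zw else out ++ [p.2]) out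
        = out ++ pvGJoin zw cs := by
  induction cs with
  | nil => intro k out _; simp [pvGJoin]
  | cons c rest ih =>
    intro k out hN
    rw [PySem.List.enumerate_cons, List.foldl_cons]
    cases rest with
    | nil =>
      have hc : ¬((k : Int) < (N : Int) - 1) := by simp at hN; omega
      rw [if_neg hc]
      simp [pvGJoin]
    | cons c2 rest' =>
      have hc : (k : Int) < (N : Int) - 1 := by simp at hN; omega
      rw [if_pos hc]
      have hcast : ((k : Int) + 1) = ((k + 1 : Nat) : Int) := by push_cast; ring
      rw [hcast, ih (k + 1) _ (by simp at hN ⊢; omega)]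
      rw [pvGJoin]
      simp

-- A's insert_between_every with between_alnum_only=False, every_n=1 is exactly zwchar.join(kw)
theorem pv_split_kw_eq (kw zwchar : String) :
    (insert_between_every kw zwchar false 1).toList =
      PySem.Chars.join zwchar.toList (kw.toList.map (fun c => [c])) := by
  unfold insert_between_every
  simp only [Bool.not_false, Bool.true_or, eq_self_iff_true, if_true, le_refl, true_or]
  rw [show ((0 : Int) = ((0 : Nat) : Int)) from rfl]
  rw [pv_ibe_fold zwchar.toList kw.toList.length kw.toList 0 [] (by simp)]
  rw [pv_join_eq_gJoin]
  simp

-- the per-keyword steps of the two outer folds agree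
theorem pv_step_eq (zwchar : String) (case_sensitive : Bool) (replaced : List Char) (kw : String) :
    (if kw.toList = [] then replaced
     else
       let target := if case_sensitive then kw.toList else PySem.Chars.lower kw.toList
       let hay := if case_sensitive then replaced else PySem.Chars.lower replaced
       let split_kw := (insert_between_every kw zwchar false 1).toList
       kwScanA replaced hay target split_kw kw.toList.length 0 (replaced.length + 1)) =
    (if kw.toList = [] then replaced
     else
       let target := if case_sensitive then kw.toList else PySem.Chars.lower kw.toList
       let hay := if case_sensitive then replaced else PySem.Chars.lower replaced
       let split_kw := PySem.Chars.join zwchar.toList (kw.toList.map (fun c => [c]))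
       kwScanB replaced hay target split_kw kw.toList.length 0 (replaced.length + 1)) := by
  by_cases hkw : kw.toList = []
  · rw [if_pos hkw, if_pos hkw]
  · rw [if_neg hkw, if_neg hkw]
    simp only [pv_split_kw_eq]
    apply pv_scan_eq
    · cases case_sensitive <;> simp [PySem.Chars.lower]
    · cases case_sensitive <;> simp [PySem.Chars.lower]
    · have : kw.toList.length ≠ 0 := by simpa using hkw
      omega
    · omega
    · omega
    · omega

-- ===== VERDICT (by name: the statement is the Claim_ definition above) =====
theorem insert_into_keywords_spec : Claim_equal_insert_into_keywords := by
  intro s keywords zwchar case_sensitive _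
  unfold Spec_insert_into_keywords insert_into_keywords insert_into_keywords_alt
  congr 1
  congr 1
  funext replaced kw
  exact pv_step_eq zwchar case_sensitive replaced kw
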